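-- pv_equiv track=rewrite | github.com/pablote3/basketball-python | toolbox/PythonConditions.py | condition_while
-- ===== SOURCE A (Python) =====
-- def condition_while(int1):
--     i = 0
--     while int1 < 5:
--         int1 += 1
--         i += 1
--         if i == 2:
--             break
--     return i
-- ===== SOURCE B (Python) =====
-- def condition_while(int1):
--     # closed form: the loop performs max(0, 5 - int1) increments, capped at 2
--     g = 5 - int1
--     if g <= 0:
--         return 0
--     return min(2, g)
-- ===== Notes on version B (the rewrite author's own statement) =====
-- stated objective: simpler
-- what changed: Replaced the bounded while-loop with a closed-form clamp: min(2, max(0, 5 - int1)).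
import Mathlib
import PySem

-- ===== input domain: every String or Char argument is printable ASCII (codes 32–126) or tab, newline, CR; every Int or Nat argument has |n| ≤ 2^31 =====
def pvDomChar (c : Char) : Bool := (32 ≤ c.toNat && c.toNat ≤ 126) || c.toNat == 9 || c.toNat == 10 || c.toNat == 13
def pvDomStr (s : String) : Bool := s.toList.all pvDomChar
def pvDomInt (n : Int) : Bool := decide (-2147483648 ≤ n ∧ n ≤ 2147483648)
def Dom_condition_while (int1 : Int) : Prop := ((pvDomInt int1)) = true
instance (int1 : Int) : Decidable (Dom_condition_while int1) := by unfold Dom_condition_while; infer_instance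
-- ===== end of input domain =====

-- B replaces the bounded while-loop with a closed-form clamp (objective: simpler).
-- ===== PORT A =====
-- loop body of A's while, with fuel = remaining iterations before the i == 2 break (at most 2)
def condition_while_go (int1 i : Int) (fuel : Nat) : Int :=
  match fuel with
  | 0 => i
  | fuel + 1 =>
    if int1 < 5 then
      let int1 := int1 + 1
      let i := i + 1
      if i == 2 then i else condition_while_go int1 i fuel
    else i

def condition_while (int1 : Int) : Int := condition_while_go int1 0 2

-- ===== PORT B =====
def condition_while_alt (int1 : Int) : Int :=
  if 5 - int1 ≤ 0 then 0 else min 2 (5 - int1)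

-- ===== PRECONDITION & SPEC =====
def Spec_condition_while (int1 : Int) (out : Int) : Prop := out = condition_while_alt int1
instance (int1 : Int) (out : Int) : Decidable (Spec_condition_while int1 out) := by unfold Spec_condition_while; infer_instance

-- ===== CLAIM (what is proved, stated in full; the proofs are below) =====
def Claim_equal_condition_while : Prop := ∀ (int1 : Int), Dom_condition_while int1 → Spec_condition_while int1 (condition_while int1)

-- ===== LEMMAS AND PROOFS =====

-- ===== VERDICT (by name: the statement is the Claim_ definition above) =====
theorem condition_while_spec : Claim_equal_condition_while := by
  intro int1 _
  unfold Spec_condition_while condition_while condition_while_alt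
  simp only [condition_while_go]
  split_ifs <;> simp_all <;> omega
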